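-- pv_equiv track=rewrite | github.com/wenfer/yijie-strm | lib115/services/event_monitor.py | process_events
-- ===== SOURCE A (Python) =====
-- from typing import Dict, List, Optional, Set, Callable
--
-- def process_events(events: List[Dict]) -> Dict[str, Set[str]]:
--     """
--     处理事件列表，提取文件变更信息
--
--     Args:
--         events: 事件列表
--
--     Returns:
--         变更信息字典: {
--             'added': set of file_ids,
--             'modified': set of file_ids,
--             'deleted': set of file_ids,
--             'moved': set of file_ids
--         }
--     """
--     changes = {
--         'added': set(),
--         'modified': set(),
--         'deleted': set(),
--         'moved': set()
--     }
--
--     for event in events: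
--         event_type = event.get('type')
--         file_id = str(event.get('file_id', ''))
--
--         if not file_id:
--             continue
--
--         event_name = event.get('event_name', '')
--
--         # 上传、接收、新建文件夹 -> 添加
--         if event_type in (2, 14, 17):  # upload_file, receive_files, new_folder
--             changes['added'].add(file_id)
--
--         # 移动、复制 -> 移动/添加
--         elif event_type in (5, 6, 18):  # move_image_file, move_file, copy_folder
--             changes['moved'].add(file_id)
--
--         # 重命名 -> 修改
--         elif event_type == 20:  # folder_rename
--             changes['modified'].add(file_id)
--
--         # 删除 -> 删除
--         elif event_type == 22:  # delete_file
--             changes['deleted'].add(file_id)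
--
--     return changes
-- ===== SOURCE B (Python) =====
-- from typing import Dict, List, Set
--
-- _CATS = (
--     ('added', (2, 14, 17)),
--     ('modified', (20,)),
--     ('deleted', (22,)),
--     ('moved', (5, 6, 18)),
-- )
--
-- def process_events(events: List[Dict]) -> Dict[str, Set[str]]:
--     # One independent comprehension pass per category.
--     return {
--         cat: {str(e['file_id']) for e in events
--               if e.get('type') in codes and str(e.get('file_id', ''))}
--         for cat, codes in _CATS
--     }
-- ===== Notes on version B (the rewrite author's own statement) =====
-- stated objective: simpler
-- what changed: Replaces A's single loop that dispatches each event through an if/elif chain into four mutable sets by one independent set-comprehension pass per category driven by a static (category, type-codes) table.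
import Mathlib
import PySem

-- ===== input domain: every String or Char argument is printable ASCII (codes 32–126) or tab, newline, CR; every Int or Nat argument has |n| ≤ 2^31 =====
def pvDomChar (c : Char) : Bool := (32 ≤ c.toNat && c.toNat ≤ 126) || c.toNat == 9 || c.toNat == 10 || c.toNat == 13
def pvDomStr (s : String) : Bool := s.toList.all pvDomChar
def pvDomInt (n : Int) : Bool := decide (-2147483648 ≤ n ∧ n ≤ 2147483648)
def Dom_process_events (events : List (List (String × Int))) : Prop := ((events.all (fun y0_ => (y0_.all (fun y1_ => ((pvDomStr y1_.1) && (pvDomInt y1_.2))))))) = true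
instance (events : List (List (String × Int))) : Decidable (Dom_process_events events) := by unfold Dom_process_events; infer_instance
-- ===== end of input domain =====

-- B replaces A's single loop with branch dispatch by one independent set-comprehension
-- pass per category (objective: simpler/alternative; return value only, no side effects).

-- ===== PORT A =====
-- one step of A's loop over the four category sets (changes dict with fixed keys)
def pvStepA (ch : PySem.Set String × PySem.Set String × PySem.Set String × PySem.Set String)
    (event : List (String × Int)) :
    PySem.Set String × PySem.Set String × PySem.Set String × PySem.Set String :=
  let event_type := List.lookup "type" event
  let file_id := match List.lookup "file_id" event with
    | some n => PySem.Int.toStr n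
    | none => ""
  if file_id = "" then ch
  else if event_type = some 2 ∨ event_type = some 14 ∨ event_type = some 17 then
    (PySem.Set.add ch.1 file_id, ch.2.1, ch.2.2.1, ch.2.2.2)
  else if event_type = some 5 ∨ event_type = some 6 ∨ event_type = some 18 then
    (ch.1, ch.2.1, ch.2.2.1, PySem.Set.add ch.2.2.2 file_id)
  else if event_type = some 20 then
    (ch.1, PySem.Set.add ch.2.1 file_id, ch.2.2.1, ch.2.2.2)
  else if event_type = some 22 then
    (ch.1, ch.2.1, PySem.Set.add ch.2.2.1 file_id, ch.2.2.2)
  else ch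

def process_events (events : List (List (String × Int))) : List (String × List String) :=
  let changes := events.foldl pvStepA (PySem.Set.empty, PySem.Set.empty, PySem.Set.empty, PySem.Set.empty)
  [("added", changes.1), ("modified", changes.2.1), ("deleted", changes.2.2.1), ("moved", changes.2.2.2)]

-- ===== PORT B =====
-- the comprehension's per-event body: e.get('type') in codes and str(e.get('file_id','')) truthy
def pvHit (e : List (String × Int)) (codes : List Int) : Option String :=
  match List.lookup "type" e with
  | some t =>
      if t ∈ codes then
        match List.lookup "file_id" e with
        | some n => if PySem.Int.toStr n = "" then none else some (PySem.Int.toStr n)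
        | none => none
      else none
  | none => none

-- the set comprehension {str(e['file_id']) for e in events if e.get('type') in codes and str(e.get('file_id',''))}
def pvCatIds (events : List (List (String × Int))) (codes : List Int) : PySem.Set String :=
  PySem.Set.ofList (events.filterMap (fun e => pvHit e codes))

def process_events_alt (events : List (List (String × Int))) : List (String × List String) :=
  [("added", pvCatIds events [2, 14, 17]),
   ("modified", pvCatIds events [20]),
   ("deleted", pvCatIds events [22]),
   ("moved", pvCatIds events [5, 6, 18])]

-- ===== PRECONDITION & SPEC =====
def Spec_process_events (events : List (List (String × Int))) (out : List (String × List String)) : Prop := out = process_events_alt events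
instance (events : List (List (String × Int))) (out : List (String × List String)) : Decidable (Spec_process_events events out) := by unfold Spec_process_events; infer_instance

-- ===== CLAIM (what is proved, stated in full; the proofs are below) =====
def Claim_equal_process_events : Prop := ∀ (events : List (List (String × Int))), Dom_process_events events → Spec_process_events events (process_events events)

-- ===== LEMMAS AND PROOFS =====

theorem pvCatIds_eq (events : List (List (String × Int))) (codes : List Int) :
    pvCatIds events codes = (events.filterMap (fun e => pvHit e codes)).foldl PySem.Set.add PySem.Set.empty := by
  simp [pvCatIds, PySem.Set.ofList_eq_foldl, PySem.Set.empty]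

theorem pvFoldA_inv (events : List (List (String × Int)))
    (a m d v : PySem.Set String) :
    events.foldl pvStepA (a, m, d, v) =
      ((events.filterMap (fun e => pvHit e [2, 14, 17])).foldl PySem.Set.add a,
       (events.filterMap (fun e => pvHit e [20])).foldl PySem.Set.add m,
       (events.filterMap (fun e => pvHit e [22])).foldl PySem.Set.add d,
       (events.filterMap (fun e => pvHit e [5, 6, 18])).foldl PySem.Set.add v) := by
  induction events generalizing a m d v with
  | nil => simp
  | cons e es ih =>
    simp only [List.foldl_cons, List.filterMap_cons]
    rcases hT : List.lookup "type" e with _ | t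
    · have hs : pvStepA (a, m, d, v) e = (a, m, d, v) := by simp [pvStepA, hT]
      rw [hs, ih]; simp [pvHit, hT]
    · rcases hF : List.lookup "file_id" e with _ | n
      · have hs : pvStepA (a, m, d, v) e = (a, m, d, v) := by simp [pvStepA, hF]
        rw [hs, ih]; simp [pvHit, hT, hF]
      · by_cases hE : PySem.Int.toStr n = ""
        · have hs : pvStepA (a, m, d, v) e = (a, m, d, v) := by simp [pvStepA, hF, hE]
          rw [hs, ih]; simp [pvHit, hT, hF, hE]
        · by_cases h1 : t = 2 ∨ t = 14 ∨ t = 17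
          · have hs : pvStepA (a, m, d, v) e = (PySem.Set.add a (PySem.Int.toStr n), m, d, v) := by
              rcases h1 with h | h | h <;> simp [pvStepA, hT, hF, hE, h]
            rw [hs, ih]
            have h2 : ¬ (t = 5 ∨ t = 6 ∨ t = 18) := by omega
            have h20 : t ≠ 20 := by omega
            have h22 : t ≠ 22 := by omega
            simp [pvHit, hT, hF, hE, h1, h2, h20, h22]
          · by_cases h2 : t = 5 ∨ t = 6 ∨ t = 18
            · have hs : pvStepA (a, m, d, v) e = (a, m, d, PySem.Set.add v (PySem.Int.toStr n)) := by
                rcases h2 with h | h | h <;> simp [pvStepA, hT, hF, hE, h]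
              rw [hs, ih]
              have h20 : t ≠ 20 := by omega
              have h22 : t ≠ 22 := by omega
              simp [pvHit, hT, hF, hE, h1, h2, h20, h22]
            · by_cases h20 : t = 20
              · have hs : pvStepA (a, m, d, v) e = (a, PySem.Set.add m (PySem.Int.toStr n), d, v) := by
                  subst h20; simp [pvStepA, hT, hF, hE]
                rw [hs, ih]; subst h20; simp [pvHit, hT, hF, hE]
              · by_cases h22 : t = 22
                · have hs : pvStepA (a, m, d, v) e = (a, m, PySem.Set.add d (PySem.Int.toStr n), v) := by
                    subst h22; simp [pvStepA, hT, hF, hE]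
                  rw [hs, ih]; subst h22; simp [pvHit, hT, hF, hE]
                · have hs : pvStepA (a, m, d, v) e = (a, m, d, v) := by
                    simp [pvStepA, hT, hF, hE, h1, h2, h20, h22]
                  rw [hs, ih]
                  simp [pvHit, hT, hF, hE, h1, h2, h20, h22]

-- ===== VERDICT (by name: the statement is the Claim_ definition above) =====
theorem process_events_spec : Claim_equal_process_events := by
  intro events _
  show process_events events = process_events_alt events
  simp only [process_events, process_events_alt, pvFoldA_inv, pvCatIds_eq]
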